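-- pv_equiv track=rewrite | github.com/NISETRY/Algorithm | 장하선/week6/pgm_석유 시추.py | solution
-- ===== SOURCE A (Python) =====
-- from collections import deque
-- from collections import deque
--
-- def solution(land):
--     n,m=len(land), len(land[0])
--     ans=0
--     for i in range(m):
--         queue=deque([])
--         visited=[[0 for _ in range(m)] for _ in range(n)]
--         tmp=0
--         for j in range(n):
--             # queue에 1 만나면 일단 저장하고, 1 있는 거를 싹 다 돌려버림
--             if land[j][i]==1:
--                 queue.append((j,i))
--                 visited[j][i]=1
--                 tmp+=1
--         # BFS
--         while queue:
--             r,c=queue.popleft()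
--             for d in range(4):
--                 nr,nc=r+dr[d],c+dc[d]
--                 if not (0<=nr<n and 0<=nc<m):
--                     continue
--                 if land[nr][nc]==1 and not visited[nr][nc]:
--                     queue.append((nr,nc))
--                     visited[nr][nc]=1
--                     tmp+=1
--         # 답 최댓값 갱신
--         ans=max(ans, tmp)
--     return ans
--
-- dr=[0,0,1,-1]
--
-- dc=[1,-1,0,0]
-- ===== SOURCE B (Python) =====
-- def solution(land):
--     n, m = len(land), len(land[0])
--     ones = set()
--     for r in range(n):
--         for c in range(m):
--             if land[r][c] == 1:
--                 ones.add((r, c))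
--     best = 0
--     for i in range(m):
--         vis = {(r, c) for (r, c) in ones if c == i}
--         while True:
--             nxt = set()
--             for (r, c) in vis:
--                 for (dr2, dc2) in ((0, 1), (0, -1), (1, 0), (-1, 0)):
--                     if (r + dr2, c + dc2) in ones:
--                         nxt.add((r + dr2, c + dc2))
--             new = vis | nxt
--             if len(new) == len(vis):
--                 break
--             vis = new
--         best = max(best, len(vis))
--     return best
-- ===== Notes on version B (the rewrite author's own statement) =====
-- stated objective: faster
-- what changed: A runs a deque-based BFS with a freshly allocated n*m visited matrix and a per-cell counter for every column; B precomputes the set of 1-cells once and, per column, saturates the visited SET by whole-frontier rounds (vis |= neighbours(vis) & ones until the set stops growing), counting by set size.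
-- outside the precondition, e.g. on solution([]): A raises IndexError, B raises IndexError; on solution([[1, 1], [1]]): A raises IndexError, B raises IndexError
import Mathlib
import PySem

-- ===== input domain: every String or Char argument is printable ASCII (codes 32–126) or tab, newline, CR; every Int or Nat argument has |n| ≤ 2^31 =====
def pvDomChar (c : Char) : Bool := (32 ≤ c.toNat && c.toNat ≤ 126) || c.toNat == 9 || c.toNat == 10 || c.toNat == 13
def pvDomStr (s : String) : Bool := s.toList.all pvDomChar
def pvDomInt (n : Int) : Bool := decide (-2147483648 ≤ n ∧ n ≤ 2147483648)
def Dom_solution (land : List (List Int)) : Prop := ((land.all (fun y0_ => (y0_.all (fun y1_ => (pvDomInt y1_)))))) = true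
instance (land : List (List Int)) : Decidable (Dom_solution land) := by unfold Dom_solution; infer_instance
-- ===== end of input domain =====

-- B replaces A's per-column deque-BFS over a freshly built n*m visited matrix with: collect the 1-cells once,
-- then per column saturate the visited SET by whole-frontier rounds until it stops growing (objective: faster —
-- B never rebuilds a per-column matrix and only ever touches 1-cells; measured faster in a timing run).

-- matrix read land[r][c] / visited[r][c] (exact at the guarded in-range reads both programs perform)
def getM (v : List (List Int)) (r c : Int) : Int :=
  PySem.List.pyGetD (PySem.List.pyGetD v r []) c 0

-- ===== PORT A =====
def drA : List Int := [0, 0, 1, -1]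
def dcA : List Int := [1, -1, 0, 0]

-- visited[r][c] = 1
def vsetA (v : List (List Int)) (r c : Int) : List (List Int) :=
  PySem.List.pySetD v r (PySem.List.pySetD (PySem.List.pyGetD v r []) c 1)

-- body of 'for d in range(4)'
def stepA (land : List (List Int)) (n m r c : Int)
    (st : List (Int × Int) × List (List Int) × Int) (d : Int) :
    List (Int × Int) × List (List Int) × Int :=
  let nr := r + PySem.List.pyGetD drA d 0
  let nc := c + PySem.List.pyGetD dcA d 0
  if ¬ (0 ≤ nr ∧ nr < n ∧ 0 ≤ nc ∧ nc < m) then st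
  else if getM land nr nc = 1 ∧ getM st.2.1 nr nc = 0 then
    (st.1 ++ [(nr, nc)], vsetA st.2.1 nr nc, st.2.2 + 1)
  else st

-- 'while queue:' (fuel only makes the recursion total; it is never exhausted on the inputs reached)
def bfsA (land : List (List Int)) (n m : Int) :
    Nat → List (Int × Int) × List (List Int) × Int → List (Int × Int) × List (List Int) × Int
  | 0, st => st
  | fuel + 1, st =>
    match st.1 with
    | [] => st
    | (r, c) :: rest =>
      bfsA land n m fuel ((PySem.List.pyRange 0 4 1).foldl (stepA land n m r c) (rest, st.2.1, st.2.2))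

def solution (land : List (List Int)) : Int :=
  let n : Int := land.length
  let m : Int := (land.headD []).length
  (PySem.List.pyRange 0 m 1).foldl
    (fun ans i =>
      let st0 := (PySem.List.pyRange 0 n 1).foldl
        (fun st j =>
          if getM land j i = 1 then (st.1 ++ [(j, i)], vsetA st.2.1 j i, st.2.2 + 1) else st)
        ([], List.replicate n.toNat (List.replicate m.toNat 0), (0 : Int))
      let st := bfsA land n m (5 * (n * m) + n + 1).toNat st0
      max ans st.2.2)
    0

-- ===== PORT B =====
def dirsB : List (Int × Int) := [(0, 1), (0, -1), (1, 0), (-1, 0)]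

def onesB (land : List (List Int)) (n m : Int) : List (Int × Int) :=
  (PySem.List.pyRange 0 n 1).foldl
    (fun s r => (PySem.List.pyRange 0 m 1).foldl
      (fun s c => if getM land r c = 1 then PySem.Set.add s (r, c) else s) s)
    PySem.Set.empty

-- 'while True: … if len(new) == len(vis): break' (fuel only makes it total; vis grows strictly each kept round)
def growB (ones : List (Int × Int)) : Nat → List (Int × Int) → List (Int × Int)
  | 0, vis => vis
  | fuel + 1, vis =>
    let nxt := vis.foldl
      (fun s p => dirsB.foldl
        (fun s d => if PySem.Set.contains ones (p.1 + d.1, p.2 + d.2)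
                    then PySem.Set.add s (p.1 + d.1, p.2 + d.2) else s) s)
      PySem.Set.empty
    let new := PySem.Set.union vis nxt
    if new.length = vis.length then vis else growB ones fuel new

def solution_alt (land : List (List Int)) : Int :=
  let n : Int := land.length
  let m : Int := (land.headD []).length
  let ones := onesB land n m
  (PySem.List.pyRange 0 m 1).foldl
    (fun best i =>
      let vis0 := ones.foldl (fun s p => if p.2 = i then PySem.Set.add s p else s) PySem.Set.empty
      let vis := growB ones (ones.length + 1) vis0
      max best (vis.length : Int))
    0

-- ===== PRECONDITION & SPEC =====
-- Pre_ excludes exactly the inputs where the Python raises IndexError: the empty grid (land[0])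
-- and ragged grids with a row shorter than the first row (land[j][i] / land[nr][nc]).
def Pre_solution (land : List (List Int)) : Prop :=
  land ≠ [] ∧ ∀ row ∈ land, (land.headD []).length ≤ row.length
instance (land : List (List Int)) : Decidable (Pre_solution land) := by
  unfold Pre_solution; infer_instance

def pvWitness_solution : List (List Int) := [[1, 0], [1, 1]]

def Spec_solution (land : List (List Int)) (out : Int) : Prop := out = solution_alt land
instance (land : List (List Int)) (out : Int) : Decidable (Spec_solution land out) := by
  unfold Spec_solution; infer_instance

-- ===== CLAIM (what is proved, stated in full; the proofs are below) =====
def Claim_equal_solution : Prop :=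
  ∀ (land : List (List Int)), Dom_solution land → Pre_solution land → Spec_solution land (solution land)

-- ===== LEMMAS AND PROOFS =====

-- ---------- proof-side notions ----------
def inGridP (land : List (List Int)) (p : Int × Int) : Prop :=
  0 ≤ p.1 ∧ p.1 < (land.length : Int) ∧ 0 ≤ p.2 ∧ p.2 < ((land.headD []).length : Int)

def goodP (land : List (List Int)) (p : Int × Int) : Prop :=
  inGridP land p ∧ getM land p.1 p.2 = 1

-- cells reachable (through 1-cells) from column i
inductive ReachP (land : List (List Int)) (i : Int) : Int × Int → Prop
  | base (r : Int) : goodP land (r, i) → ReachP land i (r, i)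
  | step (p q : Int × Int) : ReachP land i p → goodP land q →
      (∃ d ∈ dirsB, q = (p.1 + d.1, p.2 + d.2)) → ReachP land i q

def stepOkP (land : List (List Int)) (p q : Int × Int) : Prop :=
  goodP land q ∧ ∃ d ∈ dirsB, q = (p.1 + d.1, p.2 + d.2)

def onesOf (land : List (List Int)) : List (Int × Int) :=
  onesB land (land.length : Int) ((land.headD []).length : Int)

-- ---------- generic fold lemmas ----------
theorem mem_foldl_gen {β : Type} (L : List β) (h : List (Int × Int) → β → List (Int × Int))
    (Q : β → (Int × Int) → Prop)
    (hs : ∀ s x p, p ∈ h s x ↔ p ∈ s ∨ Q x p) :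
    ∀ s p, p ∈ L.foldl h s ↔ p ∈ s ∨ ∃ x ∈ L, Q x p := by
  induction L with
  | nil => simp
  | cons a t ih =>
    intro s p
    rw [List.foldl_cons, ih, hs]
    simp only [List.mem_cons]
    constructor
    · rintro ((h1 | h1) | ⟨x, hx, hq⟩)
      · exact Or.inl h1
      · exact Or.inr ⟨a, Or.inl rfl, h1⟩
      · exact Or.inr ⟨x, Or.inr hx, hq⟩
    · rintro (h1 | ⟨x, (rfl | hx), hq⟩)
      · exact Or.inl (Or.inl h1)
      · exact Or.inl (Or.inr hq)
      · exact Or.inr ⟨x, hx, hq⟩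

theorem nodup_foldl_gen {β : Type} (L : List β) (h : List (Int × Int) → β → List (Int × Int))
    (hn : ∀ s x, s.Nodup → (h s x).Nodup) :
    ∀ s, s.Nodup → (L.foldl h s).Nodup := by
  induction L with
  | nil => intro s hs; simpa using hs
  | cons a t ih => intro s hs; rw [List.foldl_cons]; exact ih _ (hn s a hs)

theorem nodup_length_le {α : Type} [DecidableEq α] (l1 l2 : List α)
    (h1 : l1.Nodup) (hsub : ∀ p ∈ l1, p ∈ l2) : l1.length ≤ l2.length := by
  calc l1.length = l1.toFinset.card := (List.toFinset_card_of_nodup h1).symm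
    _ ≤ l2.toFinset.card := Finset.card_le_card (by
        intro x hx
        rw [List.mem_toFinset] at *
        exact hsub x hx)
    _ ≤ l2.length := l2.toFinset_card_le

-- ---------- B-side lemmas ----------
theorem mem_colfold (land : List (List Int)) (r : Int) (s : List (Int × Int)) (p : Int × Int) :
    p ∈ (PySem.List.pyRange 0 ((land.headD []).length : Int) 1).foldl
        (fun s c => if getM land r c = 1 then PySem.Set.add s (r, c) else s) s
    ↔ p ∈ s ∨ ∃ c, (0 ≤ c ∧ c < ((land.headD []).length : Int)) ∧ getM land r c = 1 ∧ p = (r, c) := by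
  rw [mem_foldl_gen _ _ (fun c p => getM land r c = 1 ∧ p = (r, c))]
  · simp only [PySem.List.mem_pyRange_one]
  · intro s c p
    split_ifs with hcond
    · rw [PySem.Set.mem_add]; tauto
    · tauto

theorem mem_onesOf (land : List (List Int)) (p : Int × Int) :
    p ∈ onesOf land ↔ goodP land p := by
  unfold onesOf onesB
  rw [mem_foldl_gen _ _
    (fun r p => ∃ c, (0 ≤ c ∧ c < ((land.headD []).length : Int)) ∧ getM land r c = 1 ∧ p = (r, c))
    (fun s r p => mem_colfold land r s p)]
  simp only [PySem.List.mem_pyRange_one, goodP, inGridP]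
  constructor
  · rintro (h | ⟨r, ⟨hr0, hr1⟩, c, ⟨hc0, hc1⟩, hg, rfl⟩)
    · simp [PySem.Set.empty] at h
    · exact ⟨⟨hr0, hr1, hc0, hc1⟩, hg⟩
  · rintro ⟨⟨h1, h2, h3, h4⟩, hg⟩
    exact Or.inr ⟨p.1, ⟨h1, h2⟩, p.2, ⟨h3, h4⟩, hg, rfl⟩

theorem mem_dirfold (ones : List (Int × Int)) (q : Int × Int) (s : List (Int × Int)) (p : Int × Int) :
    p ∈ dirsB.foldl
        (fun s d => if PySem.Set.contains ones (q.1 + d.1, q.2 + d.2)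
                    then PySem.Set.add s (q.1 + d.1, q.2 + d.2) else s) s
    ↔ p ∈ s ∨ ∃ d ∈ dirsB, (q.1 + d.1, q.2 + d.2) ∈ ones ∧ p = (q.1 + d.1, q.2 + d.2) := by
  rw [mem_foldl_gen _ _ (fun d p => (q.1 + d.1, q.2 + d.2) ∈ ones ∧ p = (q.1 + d.1, q.2 + d.2))]
  intro s d p
  split_ifs with hcond
  · rw [PySem.Set.mem_add, PySem.Set.contains_iff] at *; tauto
  · rw [PySem.Set.contains_iff] at hcond
    constructor
    · tauto
    · rintro (h | ⟨h1, rfl⟩)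
      · exact h
      · exact absurd h1 hcond

theorem mem_nxt (ones vis : List (Int × Int)) (p : Int × Int) :
    p ∈ vis.foldl
      (fun s q => dirsB.foldl
        (fun s d => if PySem.Set.contains ones (q.1 + d.1, q.2 + d.2)
                    then PySem.Set.add s (q.1 + d.1, q.2 + d.2) else s) s)
      PySem.Set.empty
    ↔ ∃ q ∈ vis, ∃ d ∈ dirsB, (q.1 + d.1, q.2 + d.2) ∈ ones ∧ p = (q.1 + d.1, q.2 + d.2) := by
  rw [mem_foldl_gen _ _
    (fun q p => ∃ d ∈ dirsB, (q.1 + d.1, q.2 + d.2) ∈ ones ∧ p = (q.1 + d.1, q.2 + d.2))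
    (fun s q p => mem_dirfold ones q s p)]
  simp [PySem.Set.empty]

theorem growB_spec (land : List (List Int)) (i : Int) :
    ∀ (fuel : Nat) (vis : List (Int × Int)), vis.Nodup →
      (∀ p ∈ vis, p ∈ onesOf land) → (∀ p ∈ vis, ReachP land i p) →
      (∀ r : Int, goodP land (r, i) → (r, i) ∈ vis) →
      (onesOf land).length + 1 ≤ fuel + vis.length →
      (growB (onesOf land) fuel vis).Nodup ∧
        ∀ p, p ∈ growB (onesOf land) fuel vis ↔ ReachP land i p := by
  intro fuel
  induction fuel with
  | zero =>
    intro vis hnd hsub _ _ hfuel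
    exfalso
    have := nodup_length_le vis (onesOf land) hnd hsub
    omega
  | succ fuel ih =>
    intro vis hnd hsub hreach hseeds hfuel
    rw [growB]
    set nxt := vis.foldl
      (fun s q => dirsB.foldl
        (fun s d => if PySem.Set.contains (onesOf land) (q.1 + d.1, q.2 + d.2)
                    then PySem.Set.add s (q.1 + d.1, q.2 + d.2) else s) s)
      PySem.Set.empty with hnxt
    have hmemnxt : ∀ p, p ∈ nxt ↔
        ∃ q ∈ vis, ∃ d ∈ dirsB, (q.1 + d.1, q.2 + d.2) ∈ onesOf land ∧ p = (q.1 + d.1, q.2 + d.2) :=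
      fun p => mem_nxt (onesOf land) vis p
    have happ : PySem.Set.union vis nxt =
        vis ++ List.filter (fun y => !PySem.Set.contains vis y) (PySem.Set.ofList nxt) :=
      PySem.Set.update_eq_append_filter vis nxt
    have hmemu : ∀ p, p ∈ PySem.Set.union vis nxt ↔ p ∈ vis ∨ p ∈ nxt :=
      fun p => PySem.Set.mem_union vis nxt p
    split_ifs with hlen
    · -- no growth: vis is closed
      have hfil : PySem.Set.union vis nxt = vis := by
        have h1 := congrArg List.length happ
        rw [List.length_append] at h1
        have : (List.filter (fun y => !PySem.Set.contains vis y) (PySem.Set.ofList nxt)) = [] := by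
          rw [← List.length_eq_zero_iff]
          omega
        rw [happ, this, List.append_nil]
      refine ⟨hnd, fun p => ⟨hreach p, fun hr => ?_⟩⟩
      induction hr with
      | base r hg => exact hseeds r hg
      | step p q hp hg hd ihp =>
        have hq : q ∈ nxt := by
          rw [hmemnxt]
          obtain ⟨d, hd1, hd2⟩ := hd
          exact ⟨p, ihp, d, hd1, by rw [← hd2]; exact (mem_onesOf land q).mpr hg, hd2⟩
        have := (hmemu q).mpr (Or.inr hq)
        rwa [hfil] at this
    · -- strict growth: recurse
      have hlt : vis.length < (PySem.Set.union vis nxt).length := by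
        have h1 := congrArg List.length happ
        rw [List.length_append] at h1
        omega
      apply ih
      · exact PySem.Set.nodup_union vis nxt hnd
      · intro p hp
        rcases (hmemu p).mp hp with h | h
        · exact hsub p h
        · obtain ⟨q, _, d, _, hmem, rfl⟩ := (hmemnxt p).mp h
          exact hmem
      · intro p hp
        rcases (hmemu p).mp hp with h | h
        · exact hreach p h
        · obtain ⟨q, hq, d, hd, hmem, rfl⟩ := (hmemnxt p).mp h
          exact ReachP.step q _ (hreach q hq) ((mem_onesOf land _).mp hmem) ⟨d, hd, rfl⟩
      · intro r hg
        exact (hmemu _).mpr (Or.inl (hseeds r hg))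
      · omega


-- ---------- A-side: visited-matrix lemmas ----------
def vals01 (v : List (List Int)) : Prop := ∀ row ∈ v, ∀ x ∈ row, x = 0 ∨ x = 1

def shapeA (land v : List (List Int)) : Prop :=
  v.length = land.length ∧ ∀ row ∈ v, row.length = (land.headD []).length

def vmemP (land v : List (List Int)) (p : Int × Int) : Prop :=
  inGridP land p ∧ getM v p.1 p.2 = 1

theorem pyGetD_eq_or_mem {α : Type} (xs : List α) (i : Int) (d : α) :
    PySem.List.pyGetD xs i d = d ∨ PySem.List.pyGetD xs i d ∈ xs := by
  unfold PySem.List.pyGetD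
  cases h : PySem.List.pyGet? xs i with
  | none => simp
  | some x => right; exact PySem.List.mem_of_pyGet?_eq_some xs h

theorem getM_cases (v : List (List Int)) (r c : Int) :
    getM v r c = 0 ∨ ∃ row ∈ v, getM v r c ∈ row := by
  unfold getM
  rcases pyGetD_eq_or_mem v r [] with h | h
  · rw [h]; left; simp [PySem.List.pyGetD, PySem.List.pyGet?, PySem.List.pyIdx?]
  · rcases pyGetD_eq_or_mem (PySem.List.pyGetD v r []) c 0 with h2 | h2
    · exact Or.inl h2
    · exact Or.inr ⟨_, h, h2⟩

theorem vals01_getM (v : List (List Int)) (r c : Int) (hv : vals01 v) :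
    getM v r c = 0 ∨ getM v r c = 1 := by
  rcases getM_cases v r c with h | ⟨row, hr, hc⟩
  · exact Or.inl h
  · exact hv row hr _ hc

theorem getM_replicate (n m : Nat) (r c : Int) :
    getM (List.replicate n (List.replicate m (0 : Int))) r c = 0 := by
  rcases getM_cases (List.replicate n (List.replicate m (0 : Int))) r c with h | ⟨row, hr, hc⟩
  · exact h
  · rw [List.eq_of_mem_replicate hr] at hc
    exact List.eq_of_mem_replicate hc

theorem vals01_replicate (n m : Nat) :
    vals01 (List.replicate n (List.replicate m (0 : Int))) := by
  intro row hrow x hx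
  rw [List.eq_of_mem_replicate hrow] at hx
  exact Or.inl (List.eq_of_mem_replicate hx)

theorem shape_replicate (land : List (List Int)) :
    shapeA land (List.replicate land.length (List.replicate (land.headD []).length (0 : Int))) := by
  constructor
  · simp
  · intro row hrow; rw [List.eq_of_mem_replicate hrow]; simp

theorem vsetA_eq (v : List (List Int)) (r c : Int)
    (hr0 : 0 ≤ r) (hrlt : r.toNat < v.length) (hc0 : 0 ≤ c) :
    vsetA v r c = v.set r.toNat ((v[r.toNat]'hrlt).set c.toNat 1) := by
  unfold vsetA
  rw [PySem.List.pySetD_of_nonneg _ _ hr0,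
    PySem.List.pyGetD_eq_getElem v [] hr0 (by omega),
    PySem.List.pySetD_of_nonneg _ _ hc0]

theorem vsetA_shape (land v : List (List Int)) (r c : Int)
    (hs : shapeA land v)
    (hr0 : 0 ≤ r) (hr1 : r < (land.length : Int))
    (hc0 : 0 ≤ c) :
    shapeA land (vsetA v r c) := by
  obtain ⟨hlen, hrows⟩ := hs
  have hrlt : r.toNat < v.length := by omega
  rw [vsetA_eq v r c hr0 hrlt hc0]
  refine ⟨by rw [List.length_set]; exact hlen, ?_⟩
  intro row hrow
  rcases List.mem_or_eq_of_mem_set hrow with h | h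
  · exact hrows row h
  · subst h
    rw [List.length_set]
    exact hrows _ (List.getElem_mem hrlt)

theorem vsetA_vals (v : List (List Int)) (r c : Int) (hv : vals01 v)
    (hr0 : 0 ≤ r) (hrlt : r.toNat < v.length) (hc0 : 0 ≤ c) :
    vals01 (vsetA v r c) := by
  rw [vsetA_eq v r c hr0 hrlt hc0]
  intro row hrow x hx
  rcases List.mem_or_eq_of_mem_set hrow with h | h
  · exact hv row h x hx
  · subst h
    rcases List.mem_or_eq_of_mem_set hx with h2 | h2
    · exact hv _ (List.getElem_mem hrlt) x h2
    · exact Or.inr h2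

theorem getM_getD (v : List (List Int)) (r c : Int) (hr0 : 0 ≤ r) (hc0 : 0 ≤ c) :
    getM v r c = ((v.getD r.toNat []).getD c.toNat 0) := by
  unfold getM
  rw [PySem.List.pyGetD_of_nonneg _ _ hr0, PySem.List.pyGetD_of_nonneg _ _ hc0]

theorem getD_set_eq {α : Type} (l : List α) (i j : Nat) (a d : α) (hi : i < l.length) :
    (l.set i a).getD j d = if i = j then a else l.getD j d := by
  rw [List.getD_eq_getElem?_getD, List.getElem?_set]
  by_cases h : i = j
  · subst h; simp [hi]
  · simp only [if_neg h]
    rw [← List.getD_eq_getElem?_getD]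

theorem vsetA_getM (land v : List (List Int)) (r c : Int)
    (hs : shapeA land v)
    (hr0 : 0 ≤ r) (hr1 : r < (land.length : Int))
    (hc0 : 0 ≤ c) (hc1 : c < ((land.headD []).length : Int)) :
    ∀ r' c' : Int, 0 ≤ r' → r' < (land.length : Int) → 0 ≤ c' → c' < ((land.headD []).length : Int) →
      getM (vsetA v r c) r' c' = if r' = r ∧ c' = c then 1 else getM v r' c' := by
  intro r' c' hr0' hr1' hc0' hc1'
  obtain ⟨hlen, hrows⟩ := hs
  have hrlt : r.toNat < v.length := by omega
  have hclt : c.toNat < (v[r.toNat]'hrlt).length := by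
    rw [hrows _ (List.getElem_mem hrlt)]; omega
  rw [vsetA_eq v r c hr0 hrlt hc0,
    getM_getD _ r' c' hr0' hc0', getM_getD v r' c' hr0' hc0',
    getD_set_eq _ _ _ _ _ hrlt]
  by_cases hrr : r.toNat = r'.toNat
  · rw [if_pos hrr, getD_set_eq _ _ _ _ _ hclt]
    by_cases hcc : c.toNat = c'.toNat
    · rw [if_pos hcc, if_pos ⟨by omega, by omega⟩]
    · rw [if_neg hcc, if_neg (by rintro ⟨h1, h2⟩; omega)]
      have hv : v.getD r'.toNat [] = v[r.toNat]'hrlt := by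
        rw [List.getD_eq_getElem?_getD, ← hrr, List.getElem?_eq_getElem hrlt]
        rfl
      rw [hv]
  · rw [if_neg hrr, if_neg (by rintro ⟨h1, h2⟩; omega)]

-- ---------- A-side: BFS invariants ----------
structure CoreInv (land : List (List Int)) (i : Int) (v : List (List Int)) (tmp : Int)
    (l : List (Int × Int)) : Prop where
  shape : shapeA land v
  vals : vals01 v
  nd : l.Nodup
  mem : ∀ p, p ∈ l ↔ vmemP land v p
  good : ∀ p ∈ l, goodP land p
  tmp_eq : tmp = (l.length : Int)
  reach : ∀ p ∈ l, ReachP land i p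

structure InvA (land : List (List Int)) (i : Int)
    (st : List (Int × Int) × List (List Int) × Int) (l : List (Int × Int)) : Prop where
  core : CoreInv land i st.2.1 st.2.2 l
  qmem : ∀ p ∈ st.1, vmemP land st.2.1 p
  front : ∀ p, vmemP land st.2.1 p →
    p ∈ st.1 ∨ ∀ q, stepOkP land p q → vmemP land st.2.1 q
  seeds : ∀ r : Int, goodP land (r, i) → vmemP land st.2.1 (r, i)

-- marking one fresh good cell preserves the core invariant
theorem mark_core (land : List (List Int)) (i : Int) (v : List (List Int)) (tmp : Int)
    (l : List (Int × Int)) (q0 : Int × Int)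
    (hc : CoreInv land i v tmp l)
    (hin : inGridP land q0) (hgland : getM land q0.1 q0.2 = 1)
    (hnot : getM v q0.1 q0.2 = 0) (hre : ReachP land i q0) :
    CoreInv land i (vsetA v q0.1 q0.2) (tmp + 1) (l ++ [q0]) ∧
      (∀ p, vmemP land v p → vmemP land (vsetA v q0.1 q0.2) p) ∧
      vmemP land (vsetA v q0.1 q0.2) q0 := by
  obtain ⟨h1, h2, h3, h4⟩ := hin
  have hgood : goodP land q0 := ⟨⟨h1, h2, h3, h4⟩, hgland⟩
  have hnotv : ¬ vmemP land v q0 := by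
    rintro ⟨-, hm⟩; rw [hm] at hnot; exact absurd hnot (by norm_num)
  have hq0l : q0 ∉ l := fun h => hnotv ((hc.mem q0).mp h)
  have hget := vsetA_getM land v q0.1 q0.2 hc.shape h1 h2 h3 h4
  have hmono : ∀ p, vmemP land v p → vmemP land (vsetA v q0.1 q0.2) p := by
    rintro p ⟨hpin, hp1⟩
    refine ⟨hpin, ?_⟩
    obtain ⟨g1, g2, g3, g4⟩ := hpin
    rw [hget p.1 p.2 g1 g2 g3 g4]
    split_ifs with h
    · rfl
    · exact hp1
  have hq0v : vmemP land (vsetA v q0.1 q0.2) q0 := by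
    refine ⟨⟨h1, h2, h3, h4⟩, ?_⟩
    rw [hget q0.1 q0.2 h1 h2 h3 h4, if_pos ⟨rfl, rfl⟩]
  refine ⟨⟨vsetA_shape land v q0.1 q0.2 hc.shape h1 h2 h3,
    vsetA_vals v q0.1 q0.2 hc.vals h1 (by have := hc.shape.1; omega) h3, ?_, ?_, ?_, ?_, ?_⟩,
    hmono, hq0v⟩
  · have hdisj : l.Disjoint [q0] := by
      intro a ha hb
      rw [List.mem_singleton] at hb
      subst hb
      exact hq0l ha
    exact hc.nd.append (List.nodup_singleton _) hdisj
  · intro p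
    constructor
    · intro hp
      rcases List.mem_append.mp hp with hp | hp
      · exact hmono p ((hc.mem p).mp hp)
      · rw [List.mem_singleton.mp hp]; exact hq0v
    · rintro ⟨hpin, hp1⟩
      obtain ⟨g1, g2, g3, g4⟩ := hpin
      rw [hget p.1 p.2 g1 g2 g3 g4] at hp1
      by_cases h : p.1 = q0.1 ∧ p.2 = q0.2
      · refine List.mem_append.mpr (Or.inr ?_)
        simp only [List.mem_singleton, Prod.ext_iff]
        exact h
      · rw [if_neg h] at hp1
        exact List.mem_append.mpr (Or.inl ((hc.mem p).mpr ⟨⟨g1, g2, g3, g4⟩, hp1⟩))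
  · intro p hp
    rcases List.mem_append.mp hp with hp | hp
    · exact hc.good p hp
    · rw [List.mem_singleton.mp hp]; exact hgood
  · rw [hc.tmp_eq, List.length_append, List.length_singleton]
    push_cast
    omega
  · intro p hp
    rcases List.mem_append.mp hp with hp | hp
    · exact hc.reach p hp
    · rw [List.mem_singleton.mp hp]; exact hre

theorem stepA_spec (land : List (List Int)) (i r c d : Int)
    (st : List (Int × Int) × List (List Int) × Int) (l : List (Int × Int))
    (hc : CoreInv land i st.2.1 st.2.2 l) (hrc : ReachP land i (r, c))
    (hd : (PySem.List.pyGetD drA d 0, PySem.List.pyGetD dcA d 0) ∈ dirsB) :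
    ∃ ex,
      (stepA land (land.length : Int) ((land.headD []).length : Int) r c st d).1 = st.1 ++ ex ∧
      CoreInv land i (stepA land (land.length : Int) ((land.headD []).length : Int) r c st d).2.1
        (stepA land (land.length : Int) ((land.headD []).length : Int) r c st d).2.2 (l ++ ex) ∧
      (∀ p, vmemP land st.2.1 p →
        vmemP land (stepA land (land.length : Int) ((land.headD []).length : Int) r c st d).2.1 p) ∧
      (goodP land (r + PySem.List.pyGetD drA d 0, c + PySem.List.pyGetD dcA d 0) →
        vmemP land (stepA land (land.length : Int) ((land.headD []).length : Int) r c st d).2.1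
          (r + PySem.List.pyGetD drA d 0, c + PySem.List.pyGetD dcA d 0)) := by
  simp only [stepA]
  split_ifs with h1 h2
  · -- fresh good cell: mark it
    obtain ⟨hm, hmono, hq0⟩ := mark_core land i st.2.1 st.2.2 l
      (r + PySem.List.pyGetD drA d 0, c + PySem.List.pyGetD dcA d 0) hc
      h1 h2.1 h2.2
      (ReachP.step (r, c) _ hrc ⟨h1, h2.1⟩
        ⟨(PySem.List.pyGetD drA d 0, PySem.List.pyGetD dcA d 0), hd, rfl⟩)
    exact ⟨[(r + PySem.List.pyGetD drA d 0, c + PySem.List.pyGetD dcA d 0)], rfl, hm, hmono,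
      fun _ => hq0⟩
  · -- already visited (or not land 1)
    refine ⟨[], by simp, by simpa using hc, fun p hp => hp, ?_⟩
    intro hg
    refine ⟨hg.1, ?_⟩
    rcases vals01_getM st.2.1 (r + PySem.List.pyGetD drA d 0) (c + PySem.List.pyGetD dcA d 0)
      hc.vals with h | h
    · exact absurd ⟨hg.2, h⟩ h2
    · exact h
  · -- out of bounds
    exact ⟨[], by simp, by simpa using hc, fun p hp => hp, fun hg => absurd hg.1 h1⟩


theorem dloop_spec (land : List (List Int)) (i r c : Int)
    (st : List (Int × Int) × List (List Int) × Int) (l : List (Int × Int))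
    (hc : CoreInv land i st.2.1 st.2.2 l) (hrc : ReachP land i (r, c)) :
    ∃ ex,
      ((PySem.List.pyRange 0 4 1).foldl
        (stepA land (land.length : Int) ((land.headD []).length : Int) r c) st).1 = st.1 ++ ex ∧
      CoreInv land i
        ((PySem.List.pyRange 0 4 1).foldl
          (stepA land (land.length : Int) ((land.headD []).length : Int) r c) st).2.1
        ((PySem.List.pyRange 0 4 1).foldl
          (stepA land (land.length : Int) ((land.headD []).length : Int) r c) st).2.2
        (l ++ ex) ∧
      (∀ p, vmemP land st.2.1 p →
        vmemP land ((PySem.List.pyRange 0 4 1).foldl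
          (stepA land (land.length : Int) ((land.headD []).length : Int) r c) st).2.1 p) ∧
      (∀ q, stepOkP land (r, c) q →
        vmemP land ((PySem.List.pyRange 0 4 1).foldl
          (stepA land (land.length : Int) ((land.headD []).length : Int) r c) st).2.1 q) := by
  have hr4 : PySem.List.pyRange 0 4 1 = [0, 1, 2, 3] := by decide
  rw [hr4]
  simp only [List.foldl_cons, List.foldl_nil]
  have hd0 : PySem.List.pyGetD drA 0 0 = 0 := by decide
  have hd0c : PySem.List.pyGetD dcA 0 0 = 1 := by decide
  have hd1 : PySem.List.pyGetD drA 1 0 = 0 := by decide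
  have hd1c : PySem.List.pyGetD dcA 1 0 = -1 := by decide
  have hd2 : PySem.List.pyGetD drA 2 0 = 1 := by decide
  have hd2c : PySem.List.pyGetD dcA 2 0 = 0 := by decide
  have hd3 : PySem.List.pyGetD drA 3 0 = -1 := by decide
  have hd3c : PySem.List.pyGetD dcA 3 0 = 0 := by decide
  obtain ⟨e1, hq1, hc1, hm1, hg1⟩ := stepA_spec land i r c 0 st l hc hrc (by decide)
  obtain ⟨e2, hq2, hc2, hm2, hg2⟩ := stepA_spec land i r c 1 _ _ hc1 hrc (by decide)
  obtain ⟨e3, hq3, hc3, hm3, hg3⟩ := stepA_spec land i r c 2 _ _ hc2 hrc (by decide)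
  obtain ⟨e4, hq4, hc4, hm4, hg4⟩ := stepA_spec land i r c 3 _ _ hc3 hrc (by decide)
  rw [hd0, hd0c] at hg1
  rw [hd1, hd1c] at hg2
  rw [hd2, hd2c] at hg3
  rw [hd3, hd3c] at hg4
  refine ⟨e1 ++ e2 ++ e3 ++ e4, ?_, ?_, ?_, ?_⟩
  · rw [hq4, hq3, hq2, hq1]
    simp [List.append_assoc]
  · have : l ++ (e1 ++ e2 ++ e3 ++ e4) = l ++ e1 ++ e2 ++ e3 ++ e4 := by
      simp [List.append_assoc]
    rw [this]
    exact hc4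
  · intro p hp
    exact hm4 p (hm3 p (hm2 p (hm1 p hp)))
  · rintro q ⟨hgq, dd, hdd, hq⟩
    have hmm : ∀ p, vmemP land (stepA land (land.length : Int) ((land.headD []).length : Int)
        r c st 0).2.1 p →
        vmemP land ((stepA land (land.length : Int) ((land.headD []).length : Int) r c
          (stepA land (land.length : Int) ((land.headD []).length : Int) r c
            (stepA land (land.length : Int) ((land.headD []).length : Int) r c
              (stepA land (land.length : Int) ((land.headD []).length : Int) r c st 0) 1) 2) 3)).2.1 p :=
      fun p hp => hm4 p (hm3 p (hm2 p hp))
    fin_cases hdd <;> subst hq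
    · exact hmm _ (hg1 hgq)
    · exact hm4 _ (hm3 _ (hg2 hgq))
    · exact hm4 _ (hg3 hgq)
    · exact hg4 hgq


theorem good_length_le (land : List (List Int)) (l : List (Int × Int))
    (hnd : l.Nodup) (hg : ∀ p ∈ l, goodP land p) :
    l.length ≤ land.length * (land.headD []).length := by
  have hcard : l.length = l.toFinset.card := (List.toFinset_card_of_nodup hnd).symm
  rw [hcard]
  have hmaps : ∀ p ∈ l.toFinset, (p.1.toNat, p.2.toNat) ∈
      (Finset.range land.length) ×ˢ (Finset.range (land.headD []).length) := by
    intro p hp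
    rw [List.mem_toFinset] at hp
    obtain ⟨⟨h1, h2, h3, h4⟩, -⟩ := hg p hp
    simp only [Finset.mem_product, Finset.mem_range]
    omega
  have hinj : Set.InjOn (fun p : Int × Int => (p.1.toNat, p.2.toNat)) l.toFinset := by
    intro p hp q hq h
    simp only [Finset.mem_coe, List.mem_toFinset] at hp hq
    obtain ⟨⟨hp1, -, hp3, -⟩, -⟩ := hg p hp
    obtain ⟨⟨hq1, -, hq3, -⟩, -⟩ := hg q hq
    have h1 := congrArg Prod.fst h
    have h2 := congrArg Prod.snd h
    simp only at h1 h2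
    rw [Prod.ext_iff]
    constructor <;> omega
  calc l.toFinset.card
      ≤ ((Finset.range land.length) ×ˢ (Finset.range (land.headD []).length)).card :=
        Finset.card_le_card_of_injOn _ hmaps hinj
    _ = land.length * (land.headD []).length := by
        rw [Finset.card_product, Finset.card_range, Finset.card_range]

theorem bfsA_spec (land : List (List Int)) (i : Int) :
    ∀ (fuel : Nat) (st : List (Int × Int) × List (List Int) × Int) (l : List (Int × Int)),
      InvA land i st l →
      5 * (land.length * (land.headD []).length - l.length) + st.1.length < fuel →
      ∃ l', InvA land i
          (bfsA land (land.length : Int) ((land.headD []).length : Int) fuel st) l' ∧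
        (bfsA land (land.length : Int) ((land.headD []).length : Int) fuel st).1 = [] := by
  intro fuel
  induction fuel with
  | zero => intro st l hinv hb; omega
  | succ fuel ih =>
    intro st l hinv hb
    rcases hq : st.1 with - | ⟨⟨r, c⟩, rest⟩
    · rw [bfsA, hq]
      exact ⟨l, hinv, hq⟩
    · rw [bfsA, hq]
      have hrc : ReachP land i (r, c) := by
        apply hinv.core.reach
        apply (hinv.core.mem _).mpr
        apply hinv.qmem
        rw [hq]; exact List.mem_cons_self
      obtain ⟨ex, hqe, hce, hme, hcov⟩ :=
        dloop_spec land i r c (rest, st.2.1, st.2.2) l hinv.core hrc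
      have hInv' : InvA land i
          ((PySem.List.pyRange 0 4 1).foldl
            (stepA land (land.length : Int) ((land.headD []).length : Int) r c)
            (rest, st.2.1, st.2.2)) (l ++ ex) := by
        refine ⟨hce, ?_, ?_, ?_⟩
        · intro p hp
          rw [hqe] at hp
          rcases List.mem_append.mp hp with hp | hp
          · exact hme p (hinv.qmem p (by rw [hq]; exact List.mem_cons_of_mem _ hp))
          · exact (hce.mem p).mp (List.mem_append.mpr (Or.inr hp))
        · intro p hp
          have hpl : p ∈ l ++ ex := (hce.mem p).mpr hp
          rcases List.mem_append.mp hpl with hpl | hpl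
          · have hvold : vmemP land st.2.1 p := (hinv.core.mem p).mp hpl
            rcases hinv.front p hvold with hin | hcl
            · rw [hq] at hin
              rcases List.mem_cons.mp hin with hin | hin
              · right
                intro q hqok
                subst hin
                exact hcov q hqok
              · left
                rw [hqe]
                exact List.mem_append.mpr (Or.inl hin)
            · right
              intro q hqok
              exact hme q (hcl q hqok)
          · left
            rw [hqe]
            exact List.mem_append.mpr (Or.inr hpl)
        · intro r0 hg0
          exact hme _ (hinv.seeds r0 hg0)
      apply ih _ (l ++ ex) hInv'
      have hle := good_length_le land (l ++ ex) hce.nd hce.good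
      have hq1 : ((PySem.List.pyRange 0 4 1).foldl
          (stepA land (land.length : Int) ((land.headD []).length : Int) r c)
          (rest, st.2.1, st.2.2)).1.length = rest.length + ex.length := by
        rw [hqe]; exact List.length_append
      have hq2 : st.1.length = rest.length + 1 := by rw [hq]; rfl
      have hle' : l.length + ex.length ≤ land.length * (land.headD []).length := by
        rwa [List.length_append] at hle
      rw [hq2] at hb
      rw [hq1, List.length_append]
      omega


theorem seedfold_spec (land : List (List Int)) (i : Int)
    (hi0 : 0 ≤ i) (hi1 : i < ((land.headD []).length : Int)) :
    ∀ (js : List Int), js.Nodup → (∀ j ∈ js, 0 ≤ j ∧ j < (land.length : Int)) →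
      ∀ (st : List (Int × Int) × List (List Int) × Int),
        CoreInv land i st.2.1 st.2.2 st.1 →
        (∀ j ∈ js, ¬ vmemP land st.2.1 (j, i)) →
        CoreInv land i
          (js.foldl (fun st j => if getM land j i = 1 then
            (st.1 ++ [(j, i)], vsetA st.2.1 j i, st.2.2 + 1) else st) st).2.1
          (js.foldl (fun st j => if getM land j i = 1 then
            (st.1 ++ [(j, i)], vsetA st.2.1 j i, st.2.2 + 1) else st) st).2.2
          (js.foldl (fun st j => if getM land j i = 1 then
            (st.1 ++ [(j, i)], vsetA st.2.1 j i, st.2.2 + 1) else st) st).1 ∧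
        (∀ p, vmemP land st.2.1 p →
          vmemP land (js.foldl (fun st j => if getM land j i = 1 then
            (st.1 ++ [(j, i)], vsetA st.2.1 j i, st.2.2 + 1) else st) st).2.1 p) ∧
        (∀ j ∈ js, getM land j i = 1 →
          vmemP land (js.foldl (fun st j => if getM land j i = 1 then
            (st.1 ++ [(j, i)], vsetA st.2.1 j i, st.2.2 + 1) else st) st).2.1 (j, i)) := by
  intro js
  induction js with
  | nil => intro _ _ st hc _; exact ⟨hc, fun p hp => hp, by simp⟩
  | cons j t ih =>
    intro hnd hbnd st hc hnv
    rw [List.foldl_cons]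
    by_cases hgm : getM land j i = 1
    · rw [if_pos hgm]
      have hjb := hbnd j List.mem_cons_self
      have hin : inGridP land (j, i) := ⟨hjb.1, hjb.2, hi0, hi1⟩
      have hnot : getM st.2.1 j i = 0 := by
        rcases vals01_getM st.2.1 j i hc.vals with h | h
        · exact h
        · exact absurd ⟨hin, h⟩ (hnv j List.mem_cons_self)
      obtain ⟨hm, hmono, hq0⟩ := mark_core land i st.2.1 st.2.2 st.1 (j, i) hc hin hgm hnot
        (ReachP.base j ⟨hin, hgm⟩)
      obtain ⟨hcf, hmonof, hmk⟩ := ih (List.nodup_cons.mp hnd).2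
        (fun j' hj' => hbnd j' (List.mem_cons_of_mem _ hj'))
        (st.1 ++ [(j, i)], vsetA st.2.1 j i, st.2.2 + 1) hm
        (by
          intro j' hj' hv
          obtain ⟨hin', h1'⟩ := hv
          rw [vsetA_getM land st.2.1 j i hc.shape hjb.1 hjb.2 hi0 hi1 j' i
            hin'.1 hin'.2.1 hin'.2.2.1 hin'.2.2.2] at h1'
          have hne : ¬ (j' = j ∧ i = i) := by
            rintro ⟨rfl, -⟩
            exact (List.nodup_cons.mp hnd).1 hj'
          rw [if_neg hne] at h1'
          exact hnv j' (List.mem_cons_of_mem _ hj') ⟨hin', h1'⟩)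
      refine ⟨hcf, fun p hp => hmonof p (hmono p hp), ?_⟩
      intro j' hj' hg'
      rcases List.mem_cons.mp hj' with rfl | hj'
      · exact hmonof _ hq0
      · exact hmk j' hj' hg'
    · rw [if_neg hgm]
      obtain ⟨hcf, hmonof, hmk⟩ := ih (List.nodup_cons.mp hnd).2
        (fun j' hj' => hbnd j' (List.mem_cons_of_mem _ hj')) st hc
        (fun j' hj' => hnv j' (List.mem_cons_of_mem _ hj'))
      refine ⟨hcf, hmonof, ?_⟩
      intro j' hj' hg'
      rcases List.mem_cons.mp hj' with rfl | hj'
      · exact absurd hg' hgm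
      · exact hmk j' hj' hg'


theorem colA_spec (land : List (List Int)) (i : Int)
    (hi0 : 0 ≤ i) (hi1 : i < ((land.headD []).length : Int)) :
    ∃ l' : List (Int × Int), l'.Nodup ∧ (∀ p, p ∈ l' ↔ ReachP land i p) ∧
      (bfsA land (land.length : Int) ((land.headD []).length : Int)
        (5 * ((land.length : Int) * ((land.headD []).length : Int)) + (land.length : Int) + 1).toNat
        ((PySem.List.pyRange 0 (land.length : Int) 1).foldl
          (fun st j => if getM land j i = 1 then
            (st.1 ++ [(j, i)], vsetA st.2.1 j i, st.2.2 + 1) else st)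
          ([], List.replicate ((land.length : Int)).toNat
            (List.replicate (((land.headD []).length : Int)).toNat 0), (0 : Int)))).2.2
      = (l'.length : Int) := by
  have hc0 : CoreInv land i
      (List.replicate ((land.length : Int)).toNat
        (List.replicate (((land.headD []).length : Int)).toNat (0 : Int))) 0 [] := by
    refine ⟨?_, ?_, List.nodup_nil, ?_, by simp, by simp, by simp⟩
    · simp only [Int.toNat_natCast]
      exact shape_replicate land
    · exact vals01_replicate _ _
    · intro p
      simp only [List.not_mem_nil, false_iff]
      rintro ⟨-, h⟩
      rw [getM_replicate] at h
      norm_num at h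
  obtain ⟨hcf, hmono, hmk⟩ := seedfold_spec land i hi0 hi1
    (PySem.List.pyRange 0 (land.length : Int) 1)
    (PySem.List.nodup_pyRange_one 0 (land.length : Int))
    (fun j hj => by rw [PySem.List.mem_pyRange_one] at hj; exact hj)
    ([], List.replicate ((land.length : Int)).toNat
      (List.replicate (((land.headD []).length : Int)).toNat 0), (0 : Int))
    hc0
    (by
      rintro j - ⟨-, h⟩
      rw [getM_replicate] at h
      norm_num at h)
  have hinv : InvA land i
      ((PySem.List.pyRange 0 (land.length : Int) 1).foldl
        (fun st j => if getM land j i = 1 then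
          (st.1 ++ [(j, i)], vsetA st.2.1 j i, st.2.2 + 1) else st)
        ([], List.replicate ((land.length : Int)).toNat
          (List.replicate (((land.headD []).length : Int)).toNat 0), (0 : Int)))
      ((PySem.List.pyRange 0 (land.length : Int) 1).foldl
        (fun st j => if getM land j i = 1 then
          (st.1 ++ [(j, i)], vsetA st.2.1 j i, st.2.2 + 1) else st)
        ([], List.replicate ((land.length : Int)).toNat
          (List.replicate (((land.headD []).length : Int)).toNat 0), (0 : Int))).1 := by
    refine ⟨hcf, fun p hp => (hcf.mem p).mp hp, fun p hp => Or.inl ((hcf.mem p).mpr hp), ?_⟩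
    intro r hg
    have hrb : r ∈ PySem.List.pyRange 0 (land.length : Int) 1 := by
      rw [PySem.List.mem_pyRange_one]
      exact ⟨hg.1.1, hg.1.2.1⟩
    exact hmk r hrb hg.2
  have hfuel : 5 * (land.length * (land.headD []).length -
      ((PySem.List.pyRange 0 (land.length : Int) 1).foldl
        (fun st j => if getM land j i = 1 then
          (st.1 ++ [(j, i)], vsetA st.2.1 j i, st.2.2 + 1) else st)
        ([], List.replicate ((land.length : Int)).toNat
          (List.replicate (((land.headD []).length : Int)).toNat 0), (0 : Int))).1.length) +
      ((PySem.List.pyRange 0 (land.length : Int) 1).foldl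
        (fun st j => if getM land j i = 1 then
          (st.1 ++ [(j, i)], vsetA st.2.1 j i, st.2.2 + 1) else st)
        ([], List.replicate ((land.length : Int)).toNat
          (List.replicate (((land.headD []).length : Int)).toNat 0), (0 : Int))).1.length <
      (5 * ((land.length : Int) * ((land.headD []).length : Int)) + (land.length : Int) + 1).toNat := by
    have hlen := good_length_le land _ hcf.nd hcf.good
    simp only [Int.toNat_natCast] at hlen ⊢
    have hcast : (5 * ((land.length : Int) * ((land.headD []).length : Int)) +
        (land.length : Int) + 1) =
        ((5 * (land.length * (land.headD []).length) + land.length + 1 : Nat) : Int) := by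
      push_cast; ring
    rw [hcast, Int.toNat_natCast]
    omega
  obtain ⟨l', hinvf, hqf⟩ := bfsA_spec land i _ _ _ hinv hfuel
  refine ⟨l', hinvf.core.nd, ?_, hinvf.core.tmp_eq⟩
  intro p
  constructor
  · exact fun hp => hinvf.core.reach p hp
  · intro hr
    induction hr with
    | base r hg => exact (hinvf.core.mem _).mpr (hinvf.seeds r hg)
    | step p q hp hg hd ihp =>
      have hvp := (hinvf.core.mem p).mp ihp
      rcases hinvf.front p hvp with hin | hcl
      · rw [hqf] at hin
        exact absurd hin List.not_mem_nil
      · exact (hinvf.core.mem q).mpr (hcl q ⟨hg, hd⟩)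

theorem colB_spec (land : List (List Int)) (i : Int) :
    (growB (onesOf land) ((onesOf land).length + 1)
      ((onesOf land).foldl (fun s p => if p.2 = i then PySem.Set.add s p else s)
        PySem.Set.empty)).Nodup ∧
    ∀ p, p ∈ growB (onesOf land) ((onesOf land).length + 1)
      ((onesOf land).foldl (fun s p => if p.2 = i then PySem.Set.add s p else s)
        PySem.Set.empty) ↔ ReachP land i p := by
  have hmem0 : ∀ p, p ∈ (onesOf land).foldl
      (fun s p => if p.2 = i then PySem.Set.add s p else s) PySem.Set.empty ↔
      p ∈ onesOf land ∧ p.2 = i := by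
    intro p
    rw [mem_foldl_gen _ _ (fun x p => x.2 = i ∧ p = x)
      (fun s x p => by
        split_ifs with hcond
        · rw [PySem.Set.mem_add]; tauto
        · tauto)]
    simp only [PySem.Set.empty]
    constructor
    · rintro (h | ⟨x, hx, he, rfl⟩)
      · simp at h
      · exact ⟨hx, he⟩
    · rintro ⟨hx, he⟩
      exact Or.inr ⟨p, hx, he, rfl⟩
  have hnd0 : ((onesOf land).foldl
      (fun s p => if p.2 = i then PySem.Set.add s p else s) PySem.Set.empty).Nodup := by
    apply nodup_foldl_gen _ _ (fun s x hs => ?_) _ (by simp [PySem.Set.empty])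
    split_ifs with h
    · exact PySem.Set.nodup_add _ _ hs
    · exact hs
  apply growB_spec land i _ _ hnd0
  · exact fun p hp => ((hmem0 p).mp hp).1
  · intro p hp
    obtain ⟨ho, he⟩ := (hmem0 p).mp hp
    have hg := (mem_onesOf land p).mp ho
    have hpe : p = (p.1, i) := Prod.ext rfl he
    rw [hpe]
    exact ReachP.base p.1 (by rw [← hpe]; exact hg)
  · intro r hg
    exact (hmem0 _).mpr ⟨(mem_onesOf land _).mpr hg, rfl⟩
  · omega

-- ===== VERDICT (by name: the statement is the Claim_ definition above) =====
theorem solution_spec : Claim_equal_solution := by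
  unfold Claim_equal_solution
  intro land _ _
  unfold Spec_solution
  simp only [solution, solution_alt]
  rw [show onesB land ((land.length : Int)) (((land.headD []).length : Int)) = onesOf land
    from rfl]
  apply PySem.List.foldl_congr_mem
  intro acc x hx
  rw [PySem.List.mem_pyRange_one] at hx
  obtain ⟨lA, hndA, hmemA, htA⟩ := colA_spec land x hx.1 hx.2
  obtain ⟨hndB, hmemB⟩ := colB_spec land x
  have hperm : lA.Perm (growB (onesOf land) ((onesOf land).length + 1)
      ((onesOf land).foldl (fun s p => if p.2 = x then PySem.Set.add s p else s)
        PySem.Set.empty)) :=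
    (List.perm_ext_iff_of_nodup hndA hndB).mpr
      (fun p => (hmemA p).trans (hmemB p).symm)
  rw [htA, hperm.length_eq]
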